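-- pv_equiv track=rewrite | github.com/willturneasy/24- | can/receiveAndSend.py | hex_bin
-- ===== SOURCE A (Python) =====
-- def hex_bin(hex_data):
-- 	byte_li = []
-- 	for hex_str in range(0, len(hex_data)):
-- 		data = hex_data[hex_str]
-- 		binary_str = bin(data)[2:]
-- 		if len(binary_str) < 8:
-- 			binary_str = '0' * (8 - len(binary_str)) + binary_str
-- 		byte_li.append(binary_str[::-1])
-- 	return byte_li
-- ===== SOURCE B (Python) =====
-- def hex_bin(hex_data):
--     table = {}
--     for d in hex_data:
--         if d not in table:
--             s = bin(d)
--             out = []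
--             for i in range(len(s) - 1, 1, -1):  # walk backwards, stop before the '0b' prefix
--                 out.append(s[i])
--             while len(out) < 8:
--                 out.append('0')
--             table[d] = ''.join(out)
--     return [table[d] for d in hex_data]
-- ===== Notes on version B (the rewrite author's own statement) =====
-- stated objective: alternative
-- what changed: B memoizes distinct values in a dict so each value is converted once and the output is emitted by lookup, and it builds each string directly in output order by a single backward index walk over bin(d) that stops before the '0b' prefix, padding at the tail - no slice, no conditional left-pad, no final reversal - whereas A slices off the prefix, conditionally left-pads and then reverses per element.
import Mathlib
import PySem

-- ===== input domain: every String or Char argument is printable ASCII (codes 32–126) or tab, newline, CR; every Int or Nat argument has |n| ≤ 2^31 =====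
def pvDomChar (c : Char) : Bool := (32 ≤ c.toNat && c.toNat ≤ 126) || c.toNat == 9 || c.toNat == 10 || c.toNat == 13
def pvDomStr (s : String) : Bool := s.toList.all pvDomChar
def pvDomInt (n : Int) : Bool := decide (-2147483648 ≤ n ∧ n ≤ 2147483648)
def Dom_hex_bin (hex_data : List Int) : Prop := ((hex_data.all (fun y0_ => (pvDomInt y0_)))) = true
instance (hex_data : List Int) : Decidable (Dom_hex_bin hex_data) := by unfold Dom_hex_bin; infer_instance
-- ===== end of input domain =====

-- B memoizes distinct values in a dict and builds each string directly in output order by a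
-- backward walk over bin(d) with trailing padding (no slice / left-pad / reversal); objective: alternative.

-- ===== PORT A =====
-- shared model of the Python builtin bin():
-- digit part for n > 0, most-significant bit first (bin builds digits by repeated division)
def pvBinDigits : Nat → List Char
  | 0 => []
  | (n+1) => pvBinDigits ((n+1)/2) ++ [if (n+1) % 2 = 1 then '1' else '0']
decreasing_by exact Nat.div_lt_self (Nat.succ_pos n) (by norm_num)

-- Python bin(d) as a list of chars: optional '-', then "0b", then the digits ("0" for 0). Exact for every Int.
def pvBin (d : Int) : List Char :=
  (if d < 0 then ['-'] else []) ++ ['0', 'b'] ++ (if d = 0 then ['0'] else pvBinDigits d.natAbs)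

-- the zero-padding step of A:  if len(s) < 8: s = '0'*(8-len(s)) + s
def pvPad (s : List Char) : List Char :=
  if s.length < 8 then List.replicate (8 - s.length) '0' ++ s else s

def hex_bin (hex_data : List Int) : List String :=
  (PySem.List.pyRange 0 (hex_data.length : Int) 1).foldl (fun byte_li hex_str =>
    -- data = hex_data[hex_str] (index always in range here); binary_str = bin(data)[2:], zero-padded;
    -- binary_str[::-1] is reverse (PySem.List.slice?_none_none_neg_one)
    byte_li ++ [String.ofList (pvPad (PySem.List.slice
      (pvBin (PySem.List.pyGetD hex_data hex_str 0)) (some 2) none)).reverse]) []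

-- ===== PORT B =====
-- one value's string: s = bin(d); for i in range(len(s)-1, 1, -1): out.append(s[i]);
-- while len(out) < 8: out.append('0')   (the while-loop appends exactly 8 - len(out) zeros); ''.join(out)
-- the backward for-loop:  for i in range(len(s)-1, 1, -1): out.append(s[i])
def pvWalk (s : List Char) : List Char :=
  (PySem.List.pyRange ((s.length : Int) - 1) 1 (-1)).foldl
    (fun out i => out ++ [PySem.List.pyGetD s i ' ']) []

def pvRev8 (d : Int) : String :=
  String.ofList (pvWalk (pvBin d) ++ List.replicate (8 - (pvWalk (pvBin d)).length) '0')

def hex_bin_alt (hex_data : List Int) : List String :=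
  -- first loop: if d not in table: table[d] = <string built above>
  let table := hex_data.foldl
    (fun t d => if t.contains d then t else t.insert d (pvRev8 d)) PySem.Dict.empty
  -- table[d]: the key is always present (it was inserted in the first loop), so the default is never used
  hex_data.map (fun d => table.getD d "")

-- ===== PRECONDITION & SPEC =====
def Spec_hex_bin (hex_data : List Int) (out : List String) : Prop := out = hex_bin_alt hex_data
instance (hex_data : List Int) (out : List String) : Decidable (Spec_hex_bin hex_data out) := by unfold Spec_hex_bin; infer_instance

-- ===== CLAIM =====
def Claim_equal_hex_bin : Prop := ∀ (hex_data : List Int), Dom_hex_bin hex_data → Spec_hex_bin hex_data (hex_bin hex_data)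

-- ===== LEMMAS AND PROOFS =====

-- left-pad-then-reverse is reverse-then-right-pad
theorem pad_reverse (s : List Char) :
    (pvPad s).reverse = s.reverse ++ List.replicate (8 - s.length) '0' := by
  unfold pvPad
  by_cases h : s.length < 8
  · simp [h, List.reverse_append, List.reverse_replicate]
  · have : 8 - s.length = 0 := by omega
    simp [h, this]

theorem hex_bin_eq_map (hex_data : List Int) :
    hex_bin hex_data = hex_data.map (fun data =>
      String.ofList (pvPad (PySem.List.slice (pvBin data) (some 2) none)).reverse) := by
  unfold hex_bin
  rw [PySem.List.foldl_pyRange_zero_pyGetD' hex_data 0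
        (fun acc data =>
          acc ++ [String.ofList (pvPad (PySem.List.slice (pvBin data) (some 2) none)).reverse]) []]
  rw [PySem.List.foldl_append_singleton_eq_map]
  simp

theorem pvBin_length_ge (d : Int) : 2 ≤ (pvBin d).length := by
  unfold pvBin
  by_cases h : d < 0 <;> by_cases h0 : d = 0 <;> simp [h, h0]

-- the backward index walk over s collects (s.drop 2).reverse
theorem walk_eq_drop_reverse (s : List Char) (h : 2 ≤ s.length) :
    pvWalk s = (s.drop 2).reverse := by
  unfold pvWalk
  rw [PySem.List.foldl_append_singleton_eq_map, PySem.List.pyRange_neg_one, List.map_map]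
  have hlen : ((s.length : Int) - 1 - 1).toNat = s.length - 2 := by omega
  rw [hlen]
  apply List.ext_getElem
  · simp
  · intro j h1 h2
    simp only [List.nil_append, List.getElem_map, List.getElem_range, Function.comp_apply]
    have hjlt : j < s.length - 2 := by simpa using h1
    have hidx : ((s.length : Int) - 1 - (j : Int)) = ((s.length - 1 - j : Nat) : Int) := by omega
    have hin : s.length - 1 - j < s.length := by omega
    rw [hidx, PySem.List.pyGetD_natCast, List.getD_eq_getElem s ' ' hin,
        List.getElem_reverse, List.getElem_drop]
    congr 1
    simp only [List.length_reverse, List.length_drop] at h2 ⊢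
    omega

-- one value of B equals one value of A
theorem pvRev8_eq (d : Int) :
    pvRev8 d = String.ofList (pvPad (PySem.List.slice (pvBin d) (some 2) none)).reverse := by
  unfold pvRev8
  have h2 : PySem.List.slice (pvBin d) (some 2) none = (pvBin d).drop 2 :=
    PySem.List.slice_from (pvBin d) (a := 2) (by norm_num)
  rw [h2, pad_reverse, walk_eq_drop_reverse (pvBin d) (pvBin_length_ge d)]
  simp

-- lookup in the memo table: every key of the input list maps to pvRev8 of itself
theorem table_getD (xs : List Int) (t : PySem.Dict Int String)
    (H : ∀ k, t.contains k = true → t.getD k "" = pvRev8 k) :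
    ∀ k, (k ∈ xs ∨ t.contains k = true) →
      (xs.foldl (fun t d => if t.contains d then t else t.insert d (pvRev8 d)) t).getD k ""
        = pvRev8 k := by
  induction xs generalizing t with
  | nil =>
    intro k hk
    simp only [List.foldl_nil]
    rcases hk with h | h
    · exact absurd h (by simp)
    · exact H k h
  | cons x xs ih =>
    intro k hk
    simp only [List.foldl_cons]
    by_cases hc : t.contains x
    · simp only [hc, if_true]
      apply ih t H
      rcases hk with h | h
      · rcases List.mem_cons.mp h with rfl | h'
        · right; exact hc
        · left; exact h'
      · right; exact h
    · simp only [hc]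
      apply ih (t.insert x (pvRev8 x))
      · intro j hj
        rw [PySem.Dict.contains_insert] at hj
        rw [PySem.Dict.getD_insert]
        by_cases hjx : j = x
        · simp [hjx]
        · simp only [hjx, if_false]
          apply H
          simpa [hjx] using hj
      · rcases hk with h | h
        · rcases List.mem_cons.mp h with rfl | h'
          · right; exact PySem.Dict.contains_insert_self _ _ _
          · left; exact h'
        · right
          rw [PySem.Dict.contains_insert, h, Bool.or_true]

-- ===== VERDICT =====
theorem hex_bin_spec : Claim_equal_hex_bin := by
  intro hex_data _
  unfold Spec_hex_bin hex_bin_alt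
  rw [hex_bin_eq_map]
  simp only []
  refine List.map_congr_left (fun d hd => ?_)
  rw [table_getD hex_data PySem.Dict.empty
        (by intro k hk; rw [PySem.Dict.contains_empty] at hk; exact absurd hk (by simp))
        d (Or.inl hd)]
  exact (pvRev8_eq d).symm
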